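-- pv_equiv track=rewrite | github.com/tie-ling/tub | 3/coma1/pa12.py | suche_gipfel_position
-- ===== SOURCE A (Python) =====
-- def suche_gipfel_position(trend_folge):
--     list_von_gipfel = []
--     # gipfel im mittel
--     for i in range(len(trend_folge)-1):
--         if trend_folge[i] == 1:
--             j = i + 1
--             while j < len(trend_folge):
--                 if trend_folge[j] == 2:
--                     list_von_gipfel.append(i)
--                     break
--                 if trend_folge[j] == 0:
--                     j += 1
--                     continue
--                 break
--
--     # gipfel am anfang
--     j = 1
--     while j < len(trend_folge) - 1:
--         if trend_folge[j] == 0: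
--             j += 1
--             continue
--         if trend_folge[j] == 2:
--             list_von_gipfel.append(0)
--         break
--
--     # gipfel am ende
--     if trend_folge[-1] == 1:
--         list_von_gipfel.append(len(trend_folge)-1)
--
--     if trend_folge[-1] == 0:
--         j = -2
--         while trend_folge[j] == 0:
--             j -= 1
--         if trend_folge[j] == 1:
--             list_von_gipfel.append(len(trend_folge) + j)
--
--     return list_von_gipfel
-- ===== SOURCE B (Python) =====
-- def suche_gipfel_position(trend_folge):
--     n = len(trend_folge)
--     if n == 0:
--         return []
--     # one right-to-left pass: nxt[i] = first nonzero value after index i (0 if none)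
--     nxt = [0] * n
--     nz = 0
--     for i in range(n - 1, -1, -1):
--         nxt[i] = nz
--         if trend_folge[i] != 0:
--             nz = trend_folge[i]
--     result = [i for i in range(n - 1) if trend_folge[i] == 1 and nxt[i] == 2]
--     # peak at start: first nonzero among indices 1..n-2 is a 2
--     first = next((v for v in trend_folge[1:n - 1] if v != 0), None)
--     if first == 2:
--         result.append(0)
--     # peak at end
--     last = trend_folge[-1]
--     if last == 1:
--         result.append(n - 1)
--     elif last == 0:
--         p = next((k for k in range(n - 2, -1, -1) if trend_folge[k] != 0), None)
--         if p is not None and trend_folge[p] == 1: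
--             result.append(p)
--     return result
-- ===== Notes on version B (the rewrite author's own statement) =====
-- stated objective: alternative
-- what changed: B replaces A's nested rescan (for every 1 it walks forward over the zeros to find the next nonzero value) with a single right-to-left pass that precomputes the next-nonzero-value for every index, plus direct single scans for the start and end peaks.
import Mathlib
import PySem

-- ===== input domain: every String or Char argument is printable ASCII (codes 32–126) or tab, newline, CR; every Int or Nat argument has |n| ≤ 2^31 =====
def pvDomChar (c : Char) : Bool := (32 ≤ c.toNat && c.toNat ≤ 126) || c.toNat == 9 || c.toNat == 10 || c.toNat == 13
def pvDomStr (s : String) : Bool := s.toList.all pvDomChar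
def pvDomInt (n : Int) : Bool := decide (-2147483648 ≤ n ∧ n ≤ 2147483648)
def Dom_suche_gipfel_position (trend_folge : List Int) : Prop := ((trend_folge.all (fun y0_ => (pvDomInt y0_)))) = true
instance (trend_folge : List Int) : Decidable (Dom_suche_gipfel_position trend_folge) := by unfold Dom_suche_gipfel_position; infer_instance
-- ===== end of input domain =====

-- B replaces A's rescan-after-every-1 with one right-to-left "next nonzero value" pass (a different single-pass algorithm); return value only, no mutation.

-- ===== PORT A =====
-- inner while loop of the middle 'for' (j = i+1; scan forward): true iff it appends i
-- (fuel only makes the loop total; it is never exhausted when called with fuel = t.length)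
def pvAInner (t : List Int) (j : Nat) : Nat → Bool
  | 0 => false
  | (fuel+1) =>
    match t[j]? with
    | none => false
    | some v => if v = 2 then true else if v = 0 then pvAInner t (j+1) fuel else false

-- the 'gipfel am anfang' while loop (j from 1 while j < len-1): true iff it appends 0
def pvAAnfang (t : List Int) (j : Nat) : Nat → Bool
  | 0 => false
  | (fuel+1) =>
    if j < t.length - 1 then
      (if t.getD j 0 = 0 then pvAAnfang t (j+1) fuel else t.getD j 0 = 2)
    else false

-- the backward while loop (j = -2; j -= 1 while trend[j]==0): stopping index j, none = IndexError
def pvABack (t : List Int) (j : Int) : Nat → Option Int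
  | 0 => none
  | (fuel+1) =>
    match PySem.List.pyGet? t j with
    | none => none
    | some v => if v = 0 then pvABack t (j-1) fuel else some j

def suche_gipfel_position (trend_folge : List Int) : List Int :=
  let n : Int := trend_folge.length
  -- gipfel im mittel
  let mid := (PySem.List.pyRange 0 (n-1) 1).foldl
      (fun acc i =>
        if PySem.List.pyGetD trend_folge i 0 = 1 then
          (if pvAInner trend_folge (i.toNat+1) trend_folge.length then acc ++ [i] else acc)
        else acc) []
  -- gipfel am anfang
  let withStart := if pvAAnfang trend_folge 1 trend_folge.length then mid ++ [0] else mid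
  -- gipfel am ende
  match PySem.List.pyGet? trend_folge (-1) with
  | none => withStart        -- IndexError on trend_folge[-1] (empty list): outside Pre_
  | some last =>
    let withEnd := if last = 1 then withStart ++ [n-1] else withStart
    if last = 0 then
      match pvABack trend_folge (-2) trend_folge.length with
      | none => withEnd      -- IndexError in the backward scan (all zeros): outside Pre_
      | some j =>
        if PySem.List.pyGet? trend_folge j = some (1 : Int) then withEnd ++ [n + j] else withEnd
    else withEnd

-- ===== PORT B =====
-- one right-to-left pass: (nxt, nz) where nxt[i] = first nonzero value after index i (0 if none)
def pvBNxt (t : List Int) : List Int × Int :=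
  t.foldr (fun v (p : List Int × Int) => (p.2 :: p.1, if v ≠ 0 then v else p.2)) ([], 0)

def suche_gipfel_position_alt (trend_folge : List Int) : List Int :=
  if trend_folge.length = 0 then []
  else
    let n := trend_folge.length
    let nxt := (pvBNxt trend_folge).1
    -- [i for i in range(n-1) if trend_folge[i] == 1 and nxt[i] == 2]
    let r1 := ((List.range (n-1)).filter
        (fun i => trend_folge.getD i 0 = 1 ∧ nxt.getD i 0 = 2)).map (fun k => (k : Int))
    -- peak at start: first nonzero among indices 1..n-2 is a 2
    let r2 := if (PySem.List.slice trend_folge (some 1) (some ((n : Int) - 1))).find?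
        (fun v => v ≠ 0) = some 2 then r1 ++ [0] else r1
    let last := trend_folge.getD (n-1) 0
    if last = 1 then r2 ++ [(n : Int) - 1]
    else if last = 0 then
      match ((List.range (n-1)).reverse).find? (fun k => trend_folge.getD k 0 ≠ 0) with
      | some p => if trend_folge.getD p 0 = 1 then r2 ++ [(p : Int)] else r2
      | none => r2
    else r2

-- ===== PRECONDITION & SPEC =====
-- A raises IndexError exactly on the empty list (trend_folge[-1]) and on all-zero lists
-- (the backward scan runs off the front); Pre_ excludes exactly those.
def Pre_suche_gipfel_position (trend_folge : List Int) : Prop :=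
  trend_folge ≠ [] ∧ ∃ x ∈ trend_folge, x ≠ 0
instance (trend_folge : List Int) : Decidable (Pre_suche_gipfel_position trend_folge) := by
  unfold Pre_suche_gipfel_position; infer_instance
def pvWitness_suche_gipfel_position : List Int := [1, 0, 2, 1]

def Spec_suche_gipfel_position (trend_folge : List Int) (out : List Int) : Prop := out = suche_gipfel_position_alt trend_folge
instance (trend_folge : List Int) (out : List Int) : Decidable (Spec_suche_gipfel_position trend_folge out) := by unfold Spec_suche_gipfel_position; infer_instance

-- ===== CLAIM (what is proved, stated in full; the proofs are below) =====
def Claim_equal_suche_gipfel_position : Prop := ∀ (trend_folge : List Int), Dom_suche_gipfel_position trend_folge → Pre_suche_gipfel_position trend_folge → Spec_suche_gipfel_position trend_folge (suche_gipfel_position trend_folge)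

-- ===== LEMMAS AND PROOFS =====

-- first nonzero value of a list, 0 if none (proof-side specification of both scans)
def fnz : List Int → Int
  | [] => 0
  | v :: r => if v = 0 then fnz r else v

lemma pvAInner_eq (t : List Int) (fuel j : Nat) (hf : t.length < j + fuel) :
    pvAInner t j fuel = decide (fnz (t.drop j) = 2) := by
  induction fuel generalizing j with
  | zero =>
    rw [pvAInner, List.drop_eq_nil_of_le (by omega)]
    simp [fnz]
  | succ fuel ih =>
    by_cases h : j < t.length
    · rw [pvAInner, List.getElem?_eq_getElem h, List.drop_eq_getElem_cons h]
      dsimp only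
      by_cases h2 : t[j] = 2
      · simp [fnz, h2]
      · by_cases h0 : t[j] = 0
        · rw [if_neg h2, if_pos h0, ih (j+1) (by omega)]
          simp [fnz, h0]
        · rw [if_neg h2, if_neg h0]
          simp [fnz, h0, h2]
    · rw [pvAInner, List.getElem?_eq_none (by omega), List.drop_eq_nil_of_le (by omega)]
      dsimp only
      simp [fnz]

lemma pvBNxt_snd (t : List Int) : (pvBNxt t).2 = fnz t := by
  induction t with
  | nil => simp [pvBNxt, fnz]
  | cons v r ih =>
    simp only [pvBNxt, List.foldr_cons] at *
    rw [show fnz (v :: r) = if v = 0 then fnz r else v from rfl, ← ih]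
    by_cases h : v = 0 <;> simp [h]

lemma pvBNxt_fst_getD (t : List Int) (i : Nat) (h : i < t.length) :
    (pvBNxt t).1.getD i 0 = fnz (t.drop (i+1)) := by
  induction t generalizing i with
  | nil => simp at h
  | cons v r ih =>
    cases i with
    | zero =>
      show ((pvBNxt r).2 :: (pvBNxt r).1).getD 0 0 = _
      simp [pvBNxt_snd]
    | succ i =>
      show ((pvBNxt r).2 :: (pvBNxt r).1).getD (i+1) 0 = _
      simp only [List.getD_cons_succ, List.drop_succ_cons]
      exact ih i (by simpa using h)

lemma pvAAnfang_eq (t : List Int) (fuel j : Nat) (hf : t.length - 1 ≤ j + fuel) :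
    pvAAnfang t j fuel = (((t.take (t.length - 1)).drop j).find? (fun v => v ≠ 0) == some 2) := by
  induction fuel generalizing j with
  | zero =>
    rw [pvAAnfang, List.drop_eq_nil_of_le (by simp; omega)]
    simp
  | succ fuel ih =>
    by_cases h : j < t.length - 1
    · have hgd : t.getD j 0 = t[j]'(by omega) := by
        simp [List.getD_eq_getElem?_getD, List.getElem?_eq_getElem (by omega : j < t.length)]
      rw [pvAAnfang, if_pos h, hgd,
        List.drop_eq_getElem_cons (by simp; omega : j < (t.take (t.length -1)).length)]
      by_cases h0 : t[j]'(by omega) = 0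
      · rw [if_pos h0, ih (j+1) (by omega)]
        simp only [List.getElem_take, List.find?_cons]
        simp [h0]
      · rw [if_neg h0]
        simp only [List.getElem_take, List.find?_cons]
        rw [Bool.eq_iff_iff]; simp [h0]
    · rw [pvAAnfang, if_neg h, List.drop_eq_nil_of_le (by simp; omega)]
      simp

-- pyGet? at a negative in-range index written as ↑m - ↑len
lemma pyGet?_sub_len (t : List Int) (m : Nat) (h : m < t.length) :
    PySem.List.pyGet? t ((m : Int) - t.length) = some t[m] := by
  simp only [PySem.List.pyGet?, PySem.List.pyIdx?]
  have h1 : ¬ (0 ≤ (m : Int) - t.length) := by omega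
  rw [if_neg h1, if_pos (by omega)]
  have : t.length - (-((m:Int) - t.length)).toNat = m := by omega
  rw [this]
  simp [List.getElem?_eq_getElem h]

lemma pyGet?_none_of_lt (t : List Int) (i : Int) (h : i < -(t.length : Int)) :
    PySem.List.pyGet? t i = none := by
  simp only [PySem.List.pyGet?, PySem.List.pyIdx?]
  rw [if_neg (by omega), if_neg (by omega)]
  rfl

lemma pvABack_eq (t : List Int) (m : Nat) (fuel : Nat) (hm : m < t.length)
    (hf : m + 2 ≤ fuel) :
    pvABack t ((m : Int) - t.length) fuel =
      match ((List.range (m+1)).reverse).find? (fun k => t.getD k 0 ≠ 0) with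
      | some p => some ((p : Int) - t.length)
      | none => none := by
  induction m generalizing fuel with
  | zero =>
    obtain ⟨f, rfl⟩ : ∃ f, fuel = f + 1 := ⟨fuel - 1, by omega⟩
    rw [pvABack, pyGet?_sub_len t 0 hm]
    simp only [List.range_succ, List.range_zero, List.nil_append, List.reverse_cons,
      List.reverse_nil, List.nil_append, List.find?_cons]
    by_cases h0 : t[0] = 0
    · obtain ⟨f', rfl⟩ : ∃ f', f = f' + 1 := ⟨f - 1, by omega⟩
      rw [if_pos h0, pvABack, pyGet?_none_of_lt t _ (by push_cast; omega)]
      simp [List.getD_eq_getElem?_getD, List.getElem?_eq_getElem hm, h0]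
    · rw [if_neg h0]
      simp [List.getD_eq_getElem?_getD, List.getElem?_eq_getElem hm, h0]
  | succ m ih =>
    obtain ⟨f, rfl⟩ : ∃ f, fuel = f + 1 := ⟨fuel - 1, by omega⟩
    rw [pvABack, pyGet?_sub_len t (m+1) hm]
    rw [show (List.range (m+1+1)) = List.range (m+1) ++ [m+1] from List.range_succ]
    simp only [List.reverse_append, List.reverse_singleton, List.singleton_append,
      List.find?_cons]
    by_cases h0 : t[m+1] = 0
    · rw [if_pos h0]
      have : ((m+1 : Nat) : Int) - t.length - 1 = (m : Int) - t.length := by push_cast; omega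
      rw [this, ih f (by omega) (by omega)]
      simp [List.getD_eq_getElem?_getD, List.getElem?_eq_getElem hm, h0]
    · rw [if_neg h0]
      simp [List.getD_eq_getElem?_getD, List.getElem?_eq_getElem hm, h0]

-- ===== VERDICT (by name: the statement is the Claim_ definition above) =====
theorem suche_gipfel_position_spec : Claim_equal_suche_gipfel_position := by
  intro t _ hPre
  obtain ⟨hne, x, hx, hxz⟩ := hPre
  have hlen : 1 ≤ t.length := List.length_pos_of_ne_nil hne
  have hgetD : ∀ (k : Nat) (h : k < t.length), t.getD k 0 = t[k] := fun k h => by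
    simp [List.getD_eq_getElem?_getD, List.getElem?_eq_getElem h]
  have hcast1 : ((t.length : Int) - 1) = ((t.length - 1 : Nat) : Int) := by
    rw [Nat.cast_sub hlen]; push_cast; ring
  have hlast : PySem.List.pyGet? t (-1) = some t[t.length - 1] := by
    have h2 := pyGet?_sub_len t (t.length - 1) (by omega)
    rw [← hcast1] at h2
    rw [show ((t.length : Int) - 1 - t.length) = -1 by ring] at h2
    exact h2
  -- middle loop
  have hmid : (PySem.List.pyRange 0 ((t.length : Int) - 1) 1).foldl
      (fun acc i => if PySem.List.pyGetD t i 0 = 1 then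
        (if pvAInner t (i.toNat+1) t.length then acc ++ [i] else acc) else acc) ([] : List Int) =
      ((List.range (t.length - 1)).filter
        (fun i => decide (t.getD i 0 = 1 ∧ (pvBNxt t).1.getD i 0 = 2))).map (fun k => (k : Int)) := by
    rw [PySem.List.foldl_congr_mem _ _
      (fun acc i => if (decide (PySem.List.pyGetD t i 0 = 1) && pvAInner t (i.toNat+1) t.length) = true
        then acc ++ [i] else acc) _
      (by intro acc y _
          by_cases h1 : PySem.List.pyGetD t y 0 = 1 <;>
            by_cases h2 : pvAInner t (y.toNat+1) t.length <;> simp [h1, h2])]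
    rw [PySem.List.foldl_append_if _ (fun i => i)]
    rw [PySem.List.pyRange_one, List.filter_map]
    rw [show ((t.length : Int) - 1 - 0).toNat = t.length - 1 by omega]
    rw [List.map_map, List.nil_append]
    have hfil : List.filter
        ((fun i => decide (PySem.List.pyGetD t i 0 = 1) && pvAInner t (i.toNat + 1) t.length) ∘ fun (k : Nat) => 0 + (k:Int))
        (List.range (t.length - 1)) =
        List.filter (fun i => decide (t.getD i 0 = 1 ∧ (pvBNxt t).1.getD i 0 = 2))
        (List.range (t.length - 1)) := by
      apply List.filter_congr
      intro k hk
      have hk' : k < t.length - 1 := List.mem_range.mp hk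
      simp only [Function.comp_apply, zero_add, PySem.List.pyGetD_natCast, Int.toNat_natCast]
      rw [pvAInner_eq t t.length (k+1) (by omega), pvBNxt_fst_getD t k (by omega), hgetD k (by omega)]
      simp
    rw [hfil]
    simp [Function.comp_def]
    exact List.map_eq_flatMap
  -- anfang flag
  have hanf : pvAAnfang t 1 t.length =
      decide ((PySem.List.slice t (some 1) (some ((t.length : Int) - 1))).find?
        (fun v => decide (v ≠ 0)) = some 2) := by
    rw [pvAAnfang_eq t t.length 1 (by omega), hcast1, show (1 : Int) = ((1 : Nat) : Int) by norm_num,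
      PySem.List.slice_natCast, ← List.drop_take]
    rw [Bool.eq_iff_iff]
    simp
  unfold Spec_suche_gipfel_position
  unfold suche_gipfel_position
  unfold suche_gipfel_position_alt
  rw [if_neg (by omega : ¬ t.length = 0)]
  simp only [hlast, hmid, hanf, hgetD (t.length - 1) (by omega), decide_eq_true_eq]
  by_cases h1 : t[t.length - 1] = 1
  · simp only [h1, hcast1]
    simp
  · -- last ≠ 1
    rw [if_neg h1, if_neg h1]
    by_cases h0 : t[t.length - 1] = 0
    · rw [if_pos h0, if_pos h0]
      have hlen2 : 2 ≤ t.length := by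
        by_contra hc
        have hl1 : t.length = 1 := by omega
        obtain ⟨k, hk, rfl⟩ := List.mem_iff_getElem.mp hx
        have : k = t.length - 1 := by omega
        subst this
        exact hxz h0
      rw [show (-2 : Int) = ((t.length - 2 : Nat) : Int) - t.length by
        rw [Nat.cast_sub (by omega)]; push_cast; ring]
      rw [pvABack_eq t (t.length - 2) t.length (by omega) (by omega)]
      rw [show t.length - 2 + 1 = t.length - 1 by omega]
      cases hfind : List.find? (fun k => decide (t.getD k 0 ≠ 0)) (List.range (t.length - 1)).reverse with
      | none => simp
      | some p =>
        have hp : p < t.length - 1 := by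
          have hmem := List.mem_of_find?_eq_some hfind
          rw [List.mem_reverse, List.mem_range] at hmem
          exact hmem
        simp only []
        rw [pyGet?_sub_len t p (by omega), hgetD p (by omega)]
        rw [show (t.length : Int) + ((p : Int) - t.length) = (p : Int) by ring]
        by_cases hp1 : t[p] = 1
        · rw [if_pos (by rw [hp1]), if_pos hp1]
        · rw [if_neg (by simp [hp1]), if_neg hp1]
    · rw [if_neg h0, if_neg h0]
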